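-- pv_equiv track=rewrite | github.com/KotisKotlyandii/lessons1 | ege22/180.py | f
-- ===== SOURCE A (Python) =====
-- def f(x):
--     k = x % 5
--     a,b = 0,0
--     while x > 0:
--         d = x % 5
--         if d == k:
--             a += 1
--         b += d
--         x //= 5
--     return a,b
-- ===== SOURCE B (Python) =====
-- def f(x):
--     if x <= 0:
--         return (0, 0)
--     k = x % 5
--     powers = [1]
--     while powers[-1] * 5 <= x:
--         powers.append(powers[-1] * 5)
--     a = sum(1 for p in powers if x // p % 5 == k)
--     b = x - 4 * sum(x // (5 * p) for p in powers)
--     return (a, b)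
-- ===== Notes on version B (the rewrite author's own statement) =====
-- stated objective: alternative
-- what changed: B replaces A's digit-extraction loop with a positional scheme: it builds the list of powers of 5 up to x, counts matching digits by indexed access x // p % 5, and gets the digit sum from the closed-form identity s(x) = x - 4 * sum(x // 5^i for i >= 1) instead of summing digits.
import Mathlib
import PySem

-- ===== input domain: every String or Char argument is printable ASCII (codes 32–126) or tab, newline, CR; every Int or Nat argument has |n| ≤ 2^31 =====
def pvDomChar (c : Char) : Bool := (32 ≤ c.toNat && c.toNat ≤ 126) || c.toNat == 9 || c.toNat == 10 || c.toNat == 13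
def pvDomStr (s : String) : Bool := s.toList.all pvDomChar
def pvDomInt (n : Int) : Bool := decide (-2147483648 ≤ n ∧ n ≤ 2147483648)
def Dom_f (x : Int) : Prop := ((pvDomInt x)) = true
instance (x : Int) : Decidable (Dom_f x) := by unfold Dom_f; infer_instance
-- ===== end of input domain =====

-- B works positionally over the list of powers of 5 up to x (digit i is x // 5^i % 5)
-- and uses the identity digit-sum(x) = x - 4 * Σ_{i≥1} x // 5^i; alternative algorithm, same cost.

-- ===== PORT A =====
-- while x > 0: d = x % 5; if d == k: a += 1; b += d; x //= 5
def fLoop (x k a b : Int) : Int × Int :=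
  if _h : 0 < x then
    fLoop (PySem.Int.floordiv x 5) k
      (if PySem.Int.mod x 5 = k then a + 1 else a)
      (b + PySem.Int.mod x 5)
  else (a, b)
termination_by x.toNat
decreasing_by
  all_goals rw [PySem.Int.floordiv_eq_ediv_of_pos (by norm_num)]; omega

def f (x : Int) : Int × Int :=
  fLoop x (PySem.Int.mod x 5) 0 0

-- ===== PORT B =====
-- powers = [1]; while powers[-1] * 5 <= x: powers.append(powers[-1] * 5)
def powersFrom (x p : Int) (hp : 0 < p) : List Int :=
  if h : p * 5 ≤ x then p :: powersFrom x (p * 5) (by omega) else [p]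
termination_by (x - p).toNat
decreasing_by omega

def f_alt (x : Int) : Int × Int :=
  if x ≤ 0 then (0, 0)
  else
    let k := PySem.Int.mod x 5
    let powers := powersFrom x 1 (by norm_num)
    (((powers.filter (fun p => decide (PySem.Int.mod (PySem.Int.floordiv x p) 5 = k))).length : Int),
     x - 4 * (powers.map (fun p => PySem.Int.floordiv x (5 * p))).sum)

-- ===== PRECONDITION & SPEC =====
def Spec_f (x : Int) (out : Int × Int) : Prop := out = f_alt x
instance (x : Int) (out : Int × Int) : Decidable (Spec_f x out) := by unfold Spec_f; infer_instance

-- ===== CLAIM (what is proved, stated in full; the proofs are below) =====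
def Claim_equal_f : Prop := ∀ (x : Int), Dom_f x → Spec_f x (f x)

-- ===== LEMMAS AND PROOFS =====

/-- count of base-5 digits of y equal to k -/
def cDig (y k : Int) : Int :=
  if h : 0 < y then (if y % 5 = k then 1 else 0) + cDig (y / 5) k else 0
termination_by y.toNat
decreasing_by omega

/-- sum of base-5 digits of y -/
def sDig (y : Int) : Int :=
  if h : 0 < y then y % 5 + sDig (y / 5) else 0
termination_by y.toNat
decreasing_by omega

/-- Σ_{i≥1} y // 5^i, as a recursion -/
def sQuot (y : Int) : Int :=
  if h : 0 < y then y / 5 + sQuot (y / 5) else 0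
termination_by y.toNat
decreasing_by omega

theorem fLoop_eq (x k a b : Int) :
    fLoop x k a b = (a + cDig x k, b + sDig x) := by
  by_cases h : 0 < x
  · rw [fLoop, dif_pos h,
      fLoop_eq (PySem.Int.floordiv x 5) k _ _,
      PySem.Int.floordiv_eq_ediv_of_pos (a := x) (by norm_num),
      PySem.Int.mod_eq_emod_of_pos (a := x) (by norm_num)]
    conv_rhs => rw [cDig, sDig]
    simp only [dif_pos h, Prod.mk.injEq]
    constructor
    · split_ifs <;> ring
    · ring
  · rw [fLoop, dif_neg h, cDig, dif_neg h, sDig, dif_neg h]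
    simp
termination_by x.toNat
decreasing_by
  all_goals rw [PySem.Int.floordiv_eq_ediv_of_pos (by norm_num)]; omega

theorem ediv_pos_of_le {x p : Int} (hp : 0 < p) (hpx : p ≤ x) : 0 < x / p := by
  have h1 := (Int.le_ediv_iff_mul_le (a := 1) (b := x) hp).mpr (by omega)
  omega

theorem ediv_lt5 {x p : Int} (hp : 0 < p) (h : ¬ p * 5 ≤ x) : x / p < 5 := by
  have h1 := Int.le_ediv_iff_mul_le (a := 5) (b := x) hp
  omega

theorem ediv_ediv5 {x p : Int} (hp : 0 < p) : x / p / 5 = x / (p * 5) :=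
  Int.ediv_ediv_of_nonneg (by omega)

theorem powersFrom_count (x p k : Int) (hp : 0 < p) (hpx : p ≤ x) :
    (((powersFrom x p hp).filter
        (fun q => decide (PySem.Int.mod (PySem.Int.floordiv x q) 5 = k))).length : Int)
      = cDig (x / p) k := by
  have hpos : 0 < x / p := ediv_pos_of_le hp hpx
  rw [powersFrom]
  by_cases h : p * 5 ≤ x
  · rw [dif_pos h]
    have ih := powersFrom_count x (p * 5) k (by omega) h
    rw [← ediv_ediv5 hp] at ih
    conv_rhs => rw [cDig]
    rw [dif_pos hpos]
    simp only [List.filter_cons,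
      PySem.Int.floordiv_eq_ediv_of_pos (a := x) hp,
      PySem.Int.mod_eq_emod_of_pos (a := x / p) (show (0:Int) < 5 by norm_num)]
    by_cases hk : x / p % 5 = k
    · simp only [hk, decide_true, if_true, List.length_cons]
      push_cast
      omega
    · simp only [hk, decide_false, Bool.false_eq_true, if_false]
      omega
  · rw [dif_neg h]
    have hlt : x / p < 5 := ediv_lt5 hp h
    have h5 : x / p / 5 = 0 := by omega
    conv_rhs => rw [cDig]
    rw [dif_pos hpos, h5]
    rw [cDig, dif_neg (by norm_num)]
    simp only [List.filter_cons, List.filter_nil,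
      PySem.Int.floordiv_eq_ediv_of_pos (a := x) hp,
      PySem.Int.mod_eq_emod_of_pos (a := x / p) (show (0:Int) < 5 by norm_num)]
    by_cases hk : x / p % 5 = k <;> simp [hk]
termination_by (x - p).toNat
decreasing_by omega

theorem powersFrom_sum (x p : Int) (hp : 0 < p) (hpx : p ≤ x) :
    ((powersFrom x p hp).map (fun q => PySem.Int.floordiv x (5 * q))).sum
      = sQuot (x / p) := by
  have hpos : 0 < x / p := ediv_pos_of_le hp hpx
  have h5p : x / (5 * p) = x / p / 5 := by rw [mul_comm, ← ediv_ediv5 hp]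
  rw [powersFrom]
  by_cases h : p * 5 ≤ x
  · rw [dif_pos h]
    have ih := powersFrom_sum x (p * 5) (by omega) h
    rw [← ediv_ediv5 hp] at ih
    conv_rhs => rw [sQuot]
    rw [dif_pos hpos]
    simp only [List.map_cons, List.sum_cons,
      PySem.Int.floordiv_eq_ediv_of_pos (a := x) (show (0:Int) < 5 * p by omega)]
    rw [ih, h5p]
  · rw [dif_neg h]
    have hlt : x / p < 5 := ediv_lt5 hp h
    have h50 : x / p / 5 = 0 := by omega
    conv_rhs => rw [sQuot]
    rw [dif_pos hpos, h50]
    rw [sQuot, dif_neg (by norm_num)]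
    simp [PySem.Int.floordiv_eq_ediv_of_pos (a := x) (show (0:Int) < 5 * p by omega), h5p, h50]
termination_by (x - p).toNat
decreasing_by omega

theorem sDig_eq (y : Int) (hy : 0 ≤ y) : sDig y = y - 4 * sQuot y := by
  by_cases h : 0 < y
  · rw [sDig, dif_pos h, sQuot, dif_pos h, sDig_eq (y / 5) (by omega)]
    omega
  · rw [sDig, dif_neg h, sQuot, dif_neg h]
    omega
termination_by y.toNat
decreasing_by omega

-- ===== VERDICT (by name: the statement is the Claim_ definition above) =====
theorem f_spec : Claim_equal_f := by
  intro x _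
  unfold Spec_f f f_alt
  rw [fLoop_eq]
  by_cases h : x ≤ 0
  · rw [if_pos h, cDig, dif_neg (by omega), sDig, dif_neg (by omega)]
    simp
  · rw [if_neg h]
    simp only []
    rw [powersFrom_count x 1 _ (by norm_num) (by omega),
        powersFrom_sum x 1 (by norm_num) (by omega),
        Int.ediv_one, sDig_eq x (by omega)]
    simp only [Prod.mk.injEq]
    constructor <;> ring
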